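-- pv_equiv track=rewrite | github.com/mohamadbazzy/Agentic_Rag | app/services/advisor.py | determine_department_from_path
-- ===== SOURCE A (Python) =====
-- def determine_department_from_path(path):
--     """Extract department name from the graph execution path"""
--     department = "MSFEA Advisor"  # Default
--
--     # Map node names to user-friendly department names
--     if not path:
--         return department
--
--     last_node = path[-1]
--
--     # Department mapping
--     department_map = {
--         "chemical": "Chemical Engineering",
--         "mechanical": "Mechanical Engineering",
--         "civil": "Civil Engineering",
--         "ece": "Electrical & Computer",
--         "cse": "Computer Science Engineering",
--         "cce": "Computer & Communications Engineering",
--         "industrial": "Industrial Engineering",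
--         "invalid_handler": "Error Handler"
--     }
--
--     # Check for department in path
--     for node in path:
--         if node in department_map:
--             department = department_map[node]
--
--     return department
-- ===== SOURCE B (Python) =====
-- def determine_department_from_path(path):
--     """Extract department name from the graph execution path"""
--     department_map = {
--         "chemical": "Chemical Engineering",
--         "mechanical": "Mechanical Engineering",
--         "civil": "Civil Engineering",
--         "ece": "Electrical & Computer",
--         "cse": "Computer Science Engineering",
--         "cce": "Computer & Communications Engineering",
--         "industrial": "Industrial Engineering",
--         "invalid_handler": "Error Handler"
--     }
--     for node in reversed(path):
--         if node in department_map: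
--             return department_map[node]
--     return "MSFEA Advisor"
-- ===== Notes on version B (the rewrite author's own statement) =====
-- stated objective: simpler
-- what changed: Replaces the forward scan that keeps overwriting an accumulator (plus a dead last_node variable and a special empty-path return) with a reverse iteration that returns the first mapped node immediately; early exit makes it measurably faster on paths whose last mapped node is not near the front.
import Mathlib
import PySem

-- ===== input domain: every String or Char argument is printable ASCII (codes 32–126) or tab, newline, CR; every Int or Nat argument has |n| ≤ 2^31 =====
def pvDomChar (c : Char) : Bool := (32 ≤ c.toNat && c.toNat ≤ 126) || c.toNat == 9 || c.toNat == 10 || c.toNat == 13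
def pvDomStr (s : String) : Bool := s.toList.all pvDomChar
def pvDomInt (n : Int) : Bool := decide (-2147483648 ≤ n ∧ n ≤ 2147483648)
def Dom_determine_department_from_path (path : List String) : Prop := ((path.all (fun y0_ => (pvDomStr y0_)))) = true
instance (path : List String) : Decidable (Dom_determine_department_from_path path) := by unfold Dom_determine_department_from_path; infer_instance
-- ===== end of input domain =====

-- ===== PORT A =====
-- B: iterate the path in reverse and return on the first mapped node (simpler: no accumulator, no special empty-path case).
def departmentMap : PySem.Dict String String :=
  PySem.Dict.ofList [("chemical", "Chemical Engineering"),
   ("mechanical", "Mechanical Engineering"),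
   ("civil", "Civil Engineering"),
   ("ece", "Electrical & Computer"),
   ("cse", "Computer Science Engineering"),
   ("cce", "Computer & Communications Engineering"),
   ("industrial", "Industrial Engineering"),
   ("invalid_handler", "Error Handler")]

-- Port of A: early return on empty path, then a forward scan updating `department`.
-- (A's `last_node = path[-1]` is computed but unused; the path is nonempty there, so it raises nothing.)
def determine_department_from_path (path : List String) : String :=
  if path = [] then "MSFEA Advisor"
  else
    path.foldl (fun department node =>
      match PySem.Dict.get? departmentMap node with
      | some d => d
      | none => department) "MSFEA Advisor"


-- ===== PORT B =====
-- Port of B: scan the reversed path, returning the first mapped node.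
def deptRevScan : List String → String
  | [] => "MSFEA Advisor"
  | node :: rest =>
    match PySem.Dict.get? departmentMap node with
    | some d => d
    | none => deptRevScan rest

def determine_department_from_path_alt (path : List String) : String :=
  deptRevScan path.reverse


-- ===== PRECONDITION & SPEC =====
def Spec_determine_department_from_path (path : List String) (out : String) : Prop := out = determine_department_from_path_alt path
instance (path : List String) (out : String) : Decidable (Spec_determine_department_from_path path out) := by unfold Spec_determine_department_from_path; infer_instance

-- ===== CLAIM (what is proved, stated in full; the proofs are below) =====
def Claim_equal_determine_department_from_path : Prop := ∀ (path : List String), Dom_determine_department_from_path path → Spec_determine_department_from_path path (determine_department_from_path path)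

-- ===== LEMMAS AND PROOFS =====
lemma foldl_eq_revScan (l : List String) :
    l.foldl (fun department node =>
      match PySem.Dict.get? departmentMap node with
      | some d => d
      | none => department) "MSFEA Advisor" = deptRevScan l.reverse := by
  induction l using List.reverseRecOn with
  | nil => rfl
  | append_singleton l x ih =>
      rw [List.foldl_append, List.reverse_append]
      simp only [List.foldl_cons, List.foldl_nil, List.reverse_cons, List.reverse_nil,
        List.nil_append, List.singleton_append, deptRevScan]
      cases PySem.Dict.get? departmentMap x <;> simp [ih]


-- ===== VERDICT (by name: the statement is the Claim_ definition above) =====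
theorem determine_department_from_path_spec : Claim_equal_determine_department_from_path := by
  intro path _
  unfold Spec_determine_department_from_path determine_department_from_path determine_department_from_path_alt
  cases path with
  | nil => rfl
  | cons h t =>
      rw [if_neg (by simp)]
      exact foldl_eq_revScan (h :: t)
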